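-- pv_equiv track=rewrite | github.com/adwaithkj/sortandsearchalgos | nonDivisibleSubset.py | check
-- ===== SOURCE A (Python) =====
-- def check(k, s):
--     if len(s) == 1:
--         if s[0] % k == 0:
--             return True
--
--     for i in range(len(s)):
--         for j in range(i, len(s)):
--             if (s[i]+s[j]) % k != 0:
--
--                 return False
--     return True
-- ===== SOURCE B (Python) =====
-- def check(k, s):
--     # Alternative one pass: all pairwise sums are divisible by k iff every element has the
--     # same residue r = s[0] % k and 2*r is divisible by k.
--     if not s:
--         return True
--     r = s[0] % k
--     return (2 * r) % k == 0 and all(x % k == r for x in s)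
-- ===== Notes on version B (the rewrite author's own statement) =====
-- stated objective: alternative
-- what changed: Replaced A's nested scan of all pairs (i,j) with a single residue pass: all pairwise sums are divisible by k iff every element has the same residue r = s[0] % k and (2*r) % k == 0; on early-failing inputs both exit quickly, so no speed-up was measured.
import Mathlib
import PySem

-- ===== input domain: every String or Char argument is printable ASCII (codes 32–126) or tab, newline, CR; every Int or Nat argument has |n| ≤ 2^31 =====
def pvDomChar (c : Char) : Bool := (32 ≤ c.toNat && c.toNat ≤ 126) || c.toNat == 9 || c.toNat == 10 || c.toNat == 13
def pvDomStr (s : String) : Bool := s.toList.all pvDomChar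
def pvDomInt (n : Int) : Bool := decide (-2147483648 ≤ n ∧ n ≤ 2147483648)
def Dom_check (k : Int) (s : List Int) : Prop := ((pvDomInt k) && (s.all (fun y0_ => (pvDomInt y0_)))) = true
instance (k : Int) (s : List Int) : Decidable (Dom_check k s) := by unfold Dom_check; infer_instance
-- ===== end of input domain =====

-- B replaces A's nested all-pairs divisibility scan by a one-pass residue check
-- (all elements share residue r = s[0] % k with 2*r % k == 0); objective: alternative.


-- ===== PORT A =====
-- Python A: special-case len(s)==1 with s[0]%k==0, else check every pair i ≤ j.
def check (k : Int) (s : List Int) : Bool :=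
  if s.length == 1 && (PySem.Int.mod (s.getD 0 0) k == 0) then
    true
  else
    (List.range s.length).all (fun i =>
      (List.range' i (s.length - i)).all (fun j =>
        PySem.Int.mod (s.getD i 0 + s.getD j 0) k == 0))

-- ===== PORT B =====
def check_alt (k : Int) (s : List Int) : Bool :=
  match s with
  | [] => true
  | x :: _ =>
    let r := PySem.Int.mod x k
    (PySem.Int.mod (2 * r) k == 0) && (x :: s.tail).all (fun y => PySem.Int.mod y k == r)

-- ===== PRECONDITION & SPEC =====
-- Pre_ excludes k = 0 with a nonempty list: there Python's '%' raises ZeroDivisionError in both A and B.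
def Pre_check (k : Int) (s : List Int) : Prop := s = [] ∨ k ≠ 0
instance (k : Int) (s : List Int) : Decidable (Pre_check k s) := by unfold Pre_check; infer_instance
def pvWitness_check : Int × List Int := (3, [1, 4, 7])
def Spec_check (k : Int) (s : List Int) (out : Bool) : Prop := out = check_alt k s
instance (k : Int) (s : List Int) (out : Bool) : Decidable (Spec_check k s out) := by unfold Spec_check; infer_instance

-- ===== CLAIM (what is proved, stated in full; the proofs are below) =====
def Claim_equal_check : Prop := ∀ (k : Int) (s : List Int), Dom_check k s → Pre_check k s → Spec_check k s (check k s)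

-- ===== LEMMAS AND PROOFS =====

-- Python '%' respects congruence: if k ∣ x - y then x % k = y % k.
theorem pymod_congr (k x y : Int) (h : k ∣ x - y) : PySem.Int.mod x k = PySem.Int.mod y k := by
  obtain ⟨t, ht⟩ := h
  have hx : x = y + k * t := by linarith
  simp [PySem.Int.mod, hx, Int.add_mul_fmod_self_left]

-- and conversely: equal Python remainders mean k divides the difference.
theorem dvd_sub_of_pymod_eq (k x y : Int) (h : PySem.Int.mod x k = PySem.Int.mod y k) :
    k ∣ x - y := by
  have hx := Int.fmod_def x k
  have hy := Int.fmod_def y k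
  simp only [PySem.Int.mod] at h
  exact ⟨x.fdiv k - y.fdiv k, by linear_combination hy - hx + h⟩

-- k divides x minus its own Python remainder.
theorem dvd_sub_pymod (k x : Int) : k ∣ x - PySem.Int.mod x k := by
  have hx := Int.fmod_def x k
  exact ⟨x.fdiv k, by simp [PySem.Int.mod]; linarith⟩

-- A's double loop checks exactly: every (unordered) pair of elements sums to a multiple of k.
theorem pairs_iff (k : Int) (s : List Int) :
    ((List.range s.length).all (fun i =>
      (List.range' i (s.length - i)).all (fun j =>
        PySem.Int.mod (s.getD i 0 + s.getD j 0) k == 0)) = true)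
    ↔ ∀ a ∈ s, ∀ b ∈ s, k ∣ a + b := by
  simp only [List.all_eq_true, List.mem_range, List.mem_range'_1,
    beq_iff_eq, PySem.Int.mod_eq_zero_iff_dvd]
  constructor
  · intro h a ha b hb
    obtain ⟨i, hi, rfl⟩ := List.mem_iff_getElem.mp ha
    obtain ⟨j, hj, rfl⟩ := List.mem_iff_getElem.mp hb
    rcases le_total i j with hij | hij
    · have := h i hi j ⟨hij, by omega⟩
      rw [List.getD_eq_getElem _ _ hi, List.getD_eq_getElem _ _ hj] at this
      exact this
    · have := h j hj i ⟨hij, by omega⟩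
      rw [List.getD_eq_getElem _ _ hi, List.getD_eq_getElem _ _ hj] at this
      rw [Int.add_comm] at this
      exact this
  · intro h i hi j hj
    have hj' : j < s.length := by omega
    exact h _ (List.getD_eq_getElem _ _ hi ▸ List.getElem_mem hi)
           _ (List.getD_eq_getElem _ _ hj' ▸ List.getElem_mem hj')

-- B checks the same condition, in one pass.
theorem alt_iff (k : Int) (x : Int) (rest : List Int) :
    check_alt k (x :: rest) = true ↔ ∀ a ∈ x :: rest, ∀ b ∈ x :: rest, k ∣ a + b := by
  have hxr := dvd_sub_pymod k x
  constructor
  · intro h a ha b hb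
    simp only [check_alt, List.tail_cons, Bool.and_eq_true, List.all_eq_true,
      beq_iff_eq, PySem.Int.mod_eq_zero_iff_dvd] at h
    obtain ⟨h2, hall⟩ := h
    have hxx : k ∣ x + x := by
      have : x + x - 2 * PySem.Int.mod x k = 2 * (x - PySem.Int.mod x k) := by ring
      have := dvd_add h2 (this ▸ Dvd.dvd.mul_left hxr 2)
      simpa using this
    have hax : k ∣ a - x := dvd_sub_of_pymod_eq k a x (hall a ha)
    have hbx : k ∣ b - x := dvd_sub_of_pymod_eq k b x (hall b hb)
    have : a + b = (a - x) + (b - x) + (x + x) := by ring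
    rw [this]
    exact dvd_add (dvd_add hax hbx) hxx
  · intro h
    have hxx : k ∣ x + x := h x (List.mem_cons_self) x (List.mem_cons_self)
    simp only [check_alt, List.tail_cons, Bool.and_eq_true, List.all_eq_true,
      beq_iff_eq, PySem.Int.mod_eq_zero_iff_dvd]
    refine ⟨?_, fun y hy => ?_⟩
    · have : 2 * PySem.Int.mod x k = (x + x) - 2 * (x - PySem.Int.mod x k) := by ring
      rw [this]
      exact dvd_sub hxx (Dvd.dvd.mul_left hxr 2)
    · apply pymod_congr
      have hxy : k ∣ x + y := h x (List.mem_cons_self) y hy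
      have : y - x = (x + y) - (x + x) := by ring
      rw [this]
      exact dvd_sub hxy hxx

theorem check_eq (k : Int) (s : List Int) : check k s = check_alt k s := by
  cases s with
  | nil => simp [check, check_alt]
  | cons x rest =>
    rw [Bool.eq_iff_iff]
    rw [alt_iff]
    unfold check
    split
    · next hcond =>
      simp only [List.length_cons, List.getD_cons_zero, Bool.and_eq_true, beq_iff_eq,
        PySem.Int.mod_eq_zero_iff_dvd, Nat.add_eq_right] at hcond
      obtain ⟨hlen, hdvd⟩ := hcond
      have hrest : rest = [] := List.length_eq_zero_iff.mp hlen
      subst hrest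
      constructor
      · intro _ a ha b hb
        simp only [List.mem_singleton] at ha hb
        subst ha; subst hb
        exact dvd_add hdvd hdvd
      · intro _; rfl
    · exact pairs_iff k (x :: rest)

-- ===== VERDICT (by name: the statement is the Claim_ definition above) =====
theorem check_spec : Claim_equal_check := by
  intro k s _ _
  unfold Spec_check
  exact check_eq k s
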